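-- pv_equiv track=rewrite | github.com/Liaoqitian/Exam-Generation | questions/python/zip-family/solution.py | twin_remover
-- ===== SOURCE A (Python) =====
-- def twin_remover(A, B):
--     if A == "":
--         return []
--     elif B == "":
--         return []
--     elif A[0] == B[0]: ### 1st letter of A is equal to 1st letter of B
--         return twin_remover(A[1:], B[1:])
--     else:
--         return [(A[0], B[0])] + twin_remover(A[1:], B[1:])
-- ===== SOURCE B (Python) =====
-- def twin_remover(A, B):
--     diffs = []
--     for a, b in zip(A, B):
--         if a != b:
--             diffs.append((a, b))
--     return diffs
-- ===== Notes on version B (the rewrite author's own statement) =====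
-- stated objective: faster
-- what changed: Replaced the string-slicing recursion with a single iterative accumulator loop over zip(A, B), whose min-length truncation plays the role of the two empty-string base cases.
import Mathlib
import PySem

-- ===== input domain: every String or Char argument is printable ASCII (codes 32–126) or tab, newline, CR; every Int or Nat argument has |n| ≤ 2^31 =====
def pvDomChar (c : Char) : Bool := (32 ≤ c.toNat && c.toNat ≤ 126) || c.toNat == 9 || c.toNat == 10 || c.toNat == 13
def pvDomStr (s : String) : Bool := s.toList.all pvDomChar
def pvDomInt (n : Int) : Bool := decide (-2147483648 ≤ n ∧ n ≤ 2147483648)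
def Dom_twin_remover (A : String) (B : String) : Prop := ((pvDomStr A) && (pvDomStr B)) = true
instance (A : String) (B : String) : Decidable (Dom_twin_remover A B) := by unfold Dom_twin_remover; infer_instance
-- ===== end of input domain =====

-- B replaces A's string-slicing recursion by one iterative accumulator loop over zip(A,B); return values only.
-- ===== PORT A =====
-- recursion over both character lists, mirroring A's base cases and branch order
def twinRemoverRec : List Char → List Char → List (String × String)
  | [], _ => []
  | _, [] => []
  | a :: as, b :: bs =>
    if a == b then twinRemoverRec as bs
    else [(String.ofList [a], String.ofList [b])] ++ twinRemoverRec as bs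

def twin_remover (A : String) (B : String) : List (String × String) :=
  twinRemoverRec A.toList B.toList

-- ===== PORT B =====
-- the for-loop with accumulator becomes a foldl over the zipped lists
def twin_remover_alt (A : String) (B : String) : List (String × String) :=
  (A.toList.zip B.toList).foldl
    (fun diffs ab =>
      if ab.1 != ab.2 then diffs ++ [(String.ofList [ab.1], String.ofList [ab.2])] else diffs)
    []

-- ===== PRECONDITION & SPEC =====
def Spec_twin_remover (A : String) (B : String) (out : List (String × String)) : Prop := out = twin_remover_alt A B
instance (A : String) (B : String) (out : List (String × String)) : Decidable (Spec_twin_remover A B out) := by unfold Spec_twin_remover; infer_instance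

-- ===== CLAIM (what is proved, stated in full; the proofs are below) =====
def Claim_equal_twin_remover : Prop := ∀ (A : String) (B : String), Dom_twin_remover A B → Spec_twin_remover A B (twin_remover A B)

-- ===== LEMMAS AND PROOFS =====
theorem twin_foldl_eq (as : List Char) : ∀ (bs : List Char) (acc : List (String × String)),
    (as.zip bs).foldl
      (fun diffs ab =>
        if ab.1 != ab.2 then diffs ++ [(String.ofList [ab.1], String.ofList [ab.2])] else diffs)
      acc = acc ++ twinRemoverRec as bs := by
  induction as with
  | nil => intro bs acc; simp [twinRemoverRec]
  | cons a as ih =>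
    intro bs acc
    cases bs with
    | nil => simp [twinRemoverRec]
    | cons b bs =>
      simp only [List.zip_cons_cons, List.foldl_cons]
      by_cases h : a = b
      · rw [if_neg (by simp [h]), ih]; simp [twinRemoverRec, h]
      · rw [if_pos (by simp [h]), ih]; simp [twinRemoverRec, h]

-- ===== VERDICT (by name: the statement is the Claim_ definition above) =====
theorem twin_remover_spec : Claim_equal_twin_remover := by
  intro A B _
  unfold Spec_twin_remover twin_remover twin_remover_alt
  rw [twin_foldl_eq]
  simp
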